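-- pv_equiv track=rewrite | github.com/brendabaek/leetcode_s | 202602/easy/20260203_3823.py | reverseByType
-- ===== SOURCE A (Python) =====
-- def reverseByType(s: str) -> str:
--     l1, l2 = [], []
--     for l in s:
--         if l.isalpha(): l1.append(l)
--         else: l2.append(l)
--     ans = ""
--     for l in s:
--         if l.isalpha(): ans += l1.pop()
--         else: ans += l2.pop()
--     return ans
-- ===== SOURCE B (Python) =====
-- def reverseByType(s: str) -> str:
--     cs = list(s)
--     for pred in (lambda c: c.isalpha(), lambda c: not c.isalpha()):
--         i, j = 0, len(cs) - 1
--         while i < j: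
--             if not pred(cs[i]):
--                 i += 1
--             elif not pred(cs[j]):
--                 j -= 1
--             else:
--                 cs[i], cs[j] = cs[j], cs[i]
--                 i += 1
--                 j -= 1
--     return ''.join(cs)
-- ===== Notes on version B (the rewrite author's own statement) =====
-- stated objective: alternative
-- what changed: Replaces A's two partition stacks and pop-based string rebuild by two in-place two-pointer passes over one char list, symmetrically swapping same-type characters until the pointers cross.
import Mathlib
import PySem

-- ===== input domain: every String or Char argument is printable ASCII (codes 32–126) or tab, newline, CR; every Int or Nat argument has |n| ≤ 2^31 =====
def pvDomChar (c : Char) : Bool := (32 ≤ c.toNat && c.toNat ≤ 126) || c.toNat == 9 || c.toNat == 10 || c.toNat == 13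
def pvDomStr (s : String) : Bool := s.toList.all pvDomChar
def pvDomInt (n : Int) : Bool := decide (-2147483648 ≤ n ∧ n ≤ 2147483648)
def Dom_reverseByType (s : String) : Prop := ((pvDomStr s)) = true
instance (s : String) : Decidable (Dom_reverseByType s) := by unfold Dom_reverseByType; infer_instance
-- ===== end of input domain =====

-- B replaces A's two partition stacks and pop-based rebuild by two in-place two-pointer
-- swap passes over one char list (alternative algorithm, same O(n); return value only).

-- ===== PORT A =====
-- first loop: partition the characters of s into (l1, l2)
def pvPartStep (acc : List Char × List Char) (c : Char) : List Char × List Char :=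
  if PySem.Chars.isalpha c then (acc.1 ++ [c], acc.2) else (acc.1, acc.2 ++ [c])

-- second loop state: (ans, l1, l2); 'l.pop()' is PySem.List.pop? with default index -1
-- (the 'none' branch is Python's IndexError, unreachable since l1/l2 hold exactly the alpha/non-alpha chars)
def pvBuildStep (st : List Char × List Char × List Char) (c : Char) :
    List Char × List Char × List Char :=
  if PySem.Chars.isalpha c then
    match PySem.List.pop? st.2.1 (-1) with
    | some (x, rest) => (st.1 ++ [x], rest, st.2.2)
    | none => st
  else
    match PySem.List.pop? st.2.2 (-1) with
    | some (x, rest) => (st.1 ++ [x], st.2.1, rest)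
    | none => st

def reverseByType (s : String) : String :=
  let p := s.toList.foldl pvPartStep ([], [])
  let r := s.toList.foldl pvBuildStep ([], p.1, p.2)
  String.ofList r.1

-- ===== PORT B =====
-- one two-pointer pass: advance i past non-pred chars, retreat j past non-pred chars,
-- swap cs[i] and cs[j], until the pointers cross (the while loop of Source B)
def pvTwoPtr (p : Char → Bool) (cs : List Char) (i j : Nat) : List Char :=
  if _h : i < j then
    if !p (cs.getD i ' ') then pvTwoPtr p cs (i + 1) j
    else if !p (cs.getD j ' ') then pvTwoPtr p cs i (j - 1)
    else pvTwoPtr p ((cs.set i (cs.getD j ' ')).set j (cs.getD i ' ')) (i + 1) (j - 1)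
  else cs
termination_by j - i
decreasing_by all_goals omega

def reverseByType_alt (s : String) : String :=
  let cs := s.toList
  let cs1 := pvTwoPtr PySem.Chars.isalpha cs 0 (cs.length - 1)
  let cs2 := pvTwoPtr (fun c => !PySem.Chars.isalpha c) cs1 0 (cs1.length - 1)
  String.ofList cs2

-- ===== PRECONDITION & SPEC =====
def Spec_reverseByType (s : String) (out : String) : Prop := out = reverseByType_alt s
instance (s : String) (out : String) : Decidable (Spec_reverseByType s out) := by unfold Spec_reverseByType; infer_instance

-- ===== CLAIM (what is proved, stated in full; the proofs are below) =====
def Claim_equal_reverseByType : Prop := ∀ (s : String), Dom_reverseByType s → Spec_reverseByType s (reverseByType s)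

-- ===== LEMMAS AND PROOFS =====

-- A's first loop is the partition of the characters of s
theorem pvPart_eq (t : List Char) (a b : List Char) :
    t.foldl pvPartStep (a, b)
      = (a ++ t.filter PySem.Chars.isalpha, b ++ t.filter (fun c => !PySem.Chars.isalpha c)) := by
  induction t generalizing a b with
  | nil => simp
  | cons c cs ih =>
    simp only [List.foldl_cons, pvPartStep]
    by_cases h : PySem.Chars.isalpha c <;> simp [h, ih]

-- merge: p-positions consume the first stream, the rest consume the second
def pvMerge (p : Char → Bool) : List Char → List Char → List Char → List Char
  | [], _, _ => []
  | c :: cs, as_, ns =>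
    if p c then
      match as_ with
      | a :: as' => a :: pvMerge p cs as' ns
      | [] => []
    else
      match ns with
      | n :: ns' => n :: pvMerge p cs as_ ns'
      | [] => []

-- A's second loop, fed lists of the right lengths, is the merge of the reversed lists
theorem pvBuild_eq (t : List Char) (as_ ns acc : List Char)
    (ha : as_.length = (t.filter PySem.Chars.isalpha).length)
    (hn : ns.length = (t.filter (fun c => !PySem.Chars.isalpha c)).length) :
    (t.foldl pvBuildStep (acc, as_, ns)).1
      = acc ++ pvMerge PySem.Chars.isalpha t as_.reverse ns.reverse := by
  induction t generalizing as_ ns acc with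
  | nil => simp [pvMerge]
  | cons c cs ih =>
    by_cases h : PySem.Chars.isalpha c
    · have hne : as_ ≠ [] := by
        intro e; rw [e] at ha; simp [h] at ha
      obtain ⟨as', x, rfl⟩ := List.eq_nil_or_concat as_ |>.resolve_left hne
      have ha' : as'.length = (cs.filter PySem.Chars.isalpha).length := by
        simpa [h] using ha
      have hn' : ns.length = (cs.filter (fun c => !PySem.Chars.isalpha c)).length := by
        simpa [h] using hn
      simp only [List.foldl_cons, pvBuildStep, h, if_pos, List.concat_eq_append, PySem.List.pop?_last]
      rw [ih as' ns (acc ++ [x]) ha' hn']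
      simp [pvMerge, h]
    · have hne : ns ≠ [] := by
        intro e; rw [e] at hn; simp [h] at hn
      obtain ⟨ns', x, rfl⟩ := List.eq_nil_or_concat ns |>.resolve_left hne
      have ha' : as_.length = (cs.filter PySem.Chars.isalpha).length := by
        simpa [h] using ha
      have hn' : ns'.length = (cs.filter (fun c => !PySem.Chars.isalpha c)).length := by
        simpa [h] using hn
      simp only [List.foldl_cons, pvBuildStep, h, if_neg, Bool.false_eq_true,
        not_false_iff, List.concat_eq_append, PySem.List.pop?_last]
      rw [ih as_ ns' (acc ++ [x]) ha' hn']
      simp [pvMerge, h]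

-- place: p-positions consume the stream, other chars stay
def pvPlace (p : Char → Bool) : List Char → List Char → List Char
  | [], _ => []
  | c :: cs, st =>
    if p c then
      match st with
      | x :: st' => x :: pvPlace p cs st'
      | [] => []
    else c :: pvPlace p cs st

-- "l with its p-positions holding the p-chars of l in reverse order"
def pvRevSel (p : Char → Bool) (l : List Char) : List Char :=
  pvPlace p l ((l.filter p).reverse)

theorem pvPlace_append_nonp (p : Char → Bool) (d : Char) (hd : ¬ p d = true) :
    ∀ (xs st : List Char), st.length = (xs.filter p).length →
      pvPlace p (xs ++ [d]) st = pvPlace p xs st ++ [d] := by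
  intro xs
  induction xs with
  | nil => intro st h; simp at h; subst h; simp [pvPlace, hd]
  | cons c cs ih =>
    intro st h
    by_cases hc : p c
    · cases st with
      | nil => simp [hc] at h
      | cons x st' =>
        simp only [List.cons_append, pvPlace, hc, if_pos]
        rw [ih st' (by simpa [hc] using h)]
    · simp only [List.cons_append, pvPlace, hc, if_neg, Bool.false_eq_true, not_false_iff]
      rw [ih st (by simpa [hc] using h)]

theorem pvPlace_append_p (p : Char → Bool) (d x : Char) (hd : p d = true) :
    ∀ (xs st : List Char), st.length = (xs.filter p).length →
      pvPlace p (xs ++ [d]) (st ++ [x]) = pvPlace p xs st ++ [x] := by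
  intro xs
  induction xs with
  | nil => intro st h; simp at h; subst h; simp [pvPlace, hd]
  | cons c cs ih =>
    intro st h
    by_cases hc : p c
    · cases st with
      | nil => simp [hc] at h
      | cons y st' =>
        simp only [List.cons_append, pvPlace, hc, if_pos]
        rw [ih st' (by simpa [hc] using h)]
    · simp only [List.cons_append, pvPlace, hc, if_neg, Bool.false_eq_true, not_false_iff]
      rw [ih st (by simpa [hc] using h)]

theorem pvRevSel_nil (p : Char → Bool) : pvRevSel p [] = [] := rfl

theorem pvRevSel_single (p : Char → Bool) (c : Char) : pvRevSel p [c] = [c] := by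
  by_cases h : p c <;> simp [pvRevSel, pvPlace, h]

theorem pvRevSel_cons_nonp (p : Char → Bool) (c : Char) (hc : ¬ p c = true) (xs : List Char) :
    pvRevSel p (c :: xs) = c :: pvRevSel p xs := by
  simp [pvRevSel, pvPlace, hc]

theorem pvRevSel_append_nonp (p : Char → Bool) (d : Char) (hd : ¬ p d = true) (xs : List Char) :
    pvRevSel p (xs ++ [d]) = pvRevSel p xs ++ [d] := by
  unfold pvRevSel
  have hf : ((xs ++ [d]).filter p).reverse = (xs.filter p).reverse := by
    simp [List.filter_append, hd]
  rw [hf]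
  exact pvPlace_append_nonp p d hd xs _ (by simp)

theorem pvRevSel_both (p : Char → Bool) (a b : Char) (ha : p a = true) (hb : p b = true)
    (mid : List Char) :
    pvRevSel p (a :: mid ++ [b]) = b :: pvRevSel p mid ++ [a] := by
  unfold pvRevSel
  have hf : ((a :: mid ++ [b]).filter p).reverse
      = b :: (mid.filter p).reverse ++ [a] := by
    simp [List.filter_append, ha, hb]
  rw [hf]
  simp only [List.cons_append, pvPlace, ha, if_pos]
  congr 1
  exact pvPlace_append_p p b a hb mid _ (by simp)

theorem pvPlace_length (p : Char → Bool) :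
    ∀ (l st : List Char), st.length = (l.filter p).length →
      (pvPlace p l st).length = l.length := by
  intro l
  induction l with
  | nil => intro st _; simp [pvPlace]
  | cons c cs ih =>
    intro st h
    by_cases hc : p c
    · cases st with
      | nil => simp [hc] at h
      | cons x st' => simp [pvPlace, hc, ih st' (by simpa [hc] using h)]
    · simp [pvPlace, hc, ih st (by simpa [hc] using h)]

theorem pvRevSel_length (p : Char → Bool) (l : List Char) :
    (pvRevSel p l).length = l.length :=
  pvPlace_length p l _ (by simp)

-- non-p chars are untouched by a place with an all-p stream of the right length
theorem pvPlace_filter_nonp (p : Char → Bool) :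
    ∀ (l st : List Char), st.length = (l.filter p).length → (∀ x ∈ st, p x = true) →
      (pvPlace p l st).filter (fun c => !p c) = l.filter (fun c => !p c) := by
  intro l
  induction l with
  | nil => intro st _ _; simp [pvPlace]
  | cons c cs ih =>
    intro st h hall
    by_cases hc : p c
    · cases st with
      | nil => simp [hc] at h
      | cons x st' =>
        have hx : p x = true := hall x (by simp)
        simp [pvPlace, hc, hx,
          ih st' (by simpa [hc] using h) (fun y hy => hall y (by simp [hy]))]
    · simp [pvPlace, hc, ih st (by simpa [hc] using h) hall]

-- composing the two place passes is the two-stream merge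
theorem pvPlace_place_eq_merge (p : Char → Bool) :
    ∀ (l A N : List Char), (∀ x ∈ A, p x = true) →
      pvPlace (fun c => !p c) (pvPlace p l A) N = pvMerge p l A N := by
  intro l
  induction l with
  | nil => intro A N _; simp [pvPlace, pvMerge]
  | cons c cs ih =>
    intro A N hall
    by_cases hc : p c
    · cases A with
      | nil => simp [pvPlace, pvMerge, hc]
      | cons a A' =>
        have hpa : p a = true := hall a (by simp)
        simp only [pvPlace, pvMerge, hc, if_pos]
        simp only [hpa, Bool.not_true, Bool.false_eq_true, if_neg, not_false_iff]
        rw [ih A' N (fun y hy => hall y (by simp [hy]))]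
    · cases N with
      | nil => simp [pvPlace, pvMerge, hc]
      | cons n N' =>
        simp only [pvPlace, pvMerge, hc, Bool.not_false, if_neg, if_pos, Bool.false_eq_true,
          not_false_iff]
        rw [ih A N' hall]

-- the two-pointer loop realises pvRevSel on the segment [i, j]
theorem pvGetD_eq (l : List Char) (n : Nat) (h : n < l.length) : l.getD n ' ' = l[n] :=
  List.getD_eq_getElem l ' ' h

theorem pvTake_succ_eq (l : List Char) (n : Nat) (h : n < l.length) :
    l.take (n + 1) = l.take n ++ [l[n]] := by
  rw [List.take_add_one]; simp [List.getElem?_eq_getElem h]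

-- the segment cs[i..j] split into its first char, middle, last char
theorem pvSeg_decomp (cs : List Char) (i j : Nat) (hij : i < j) (hj : j < cs.length) :
    (cs.drop i).take (j + 1 - i)
      = cs[i]'(by omega) :: ((cs.drop (i + 1)).take (j - 1 - i) ++ [cs[j]]) := by
  rw [List.drop_eq_getElem_cons (by omega : i < cs.length)]
  have h1 : j + 1 - i = (j - i - 1) + 1 + 1 := by omega
  rw [h1, List.take_succ_cons]
  congr 1
  rw [pvTake_succ_eq _ _ (by simp; omega)]
  have h2 : (cs.drop (i + 1))[j - i - 1]'(by simp; omega) = cs[j] := by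
    rw [List.getElem_drop]
    congr 1; omega
  rw [h2]
  congr 2
  omega

theorem pvSwapTake (cs : List Char) (i j : Nat) (a b : Char) (hij : i < j) (hj : j < cs.length) :
    ((cs.set i b).set j a).take (i + 1) = cs.take i ++ [b] := by
  apply List.ext_getElem (by simp; omega)
  intro k h1 h2
  simp only [List.getElem_take, List.getElem_set]
  simp only [List.length_take, List.length_set, List.length_append, List.length_cons,
    List.length_nil] at h1 h2
  rcases Nat.lt_or_ge k i with hk | hk
  · rw [if_neg (by omega), if_neg (by omega)]
    rw [List.getElem_append_left (by simp; omega), List.getElem_take]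
  · have hk' : k = i := by omega
    subst hk'
    rw [if_neg (by omega), if_pos rfl]
    rw [List.getElem_append_right (by simp)]
    simp only [List.length_take, List.getElem_singleton]

theorem pvSwapMid (cs : List Char) (i j : Nat) (a b : Char) (hij : i < j) (hj : j < cs.length) :
    ((((cs.set i b).set j a).drop (i + 1)).take (j - 1 - i)) = (cs.drop (i + 1)).take (j - 1 - i) := by
  apply List.ext_getElem (by simp)
  intro k h1 h2
  simp only [List.length_take, List.length_drop, List.length_set] at h1 h2
  simp only [List.getElem_take, List.getElem_drop, List.getElem_set]
  rw [if_neg (by omega), if_neg (by omega)]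

theorem pvSwapDrop (cs : List Char) (i j : Nat) (a b : Char) (hij : i < j) (hj : j < cs.length) :
    ((cs.set i b).set j a).drop j = a :: cs.drop (j + 1) := by
  apply List.ext_getElem (by simp; omega)
  intro k h1 h2
  simp only [List.length_drop, List.length_set, List.length_cons] at h1 h2
  rcases Nat.eq_zero_or_pos k with rfl | hk
  · simp only [List.getElem_drop, List.getElem_set, Nat.add_zero]
    simp
  · cases k with
    | zero => omega
    | succ m =>
      rw [List.getElem_drop]
      simp only [List.getElem_set]
      rw [if_neg (by omega), if_neg (by omega), List.getElem_cons_succ, List.getElem_drop]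
      have hm : j + (m + 1) = j + 1 + m := by omega
      exact getElem_congr_idx hm

theorem pvTwoPtr_spec (p : Char → Bool) :
    ∀ (cs : List Char) (i j : Nat), j < cs.length → i ≤ j + 1 →
      pvTwoPtr p cs i j
        = cs.take i ++ pvRevSel p ((cs.drop i).take (j + 1 - i)) ++ cs.drop (j + 1) := by
  intro cs i j
  induction cs, i, j using pvTwoPtr.induct p with
  | case1 cs i j hij hni ih =>
    -- advance i
    intro hj _
    have hi : i < cs.length := by omega
    rw [pvTwoPtr]
    rw [dif_pos hij, if_pos hni]
    rw [ih (by omega) (by omega)]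
    rw [pvGetD_eq cs i hi] at hni
    have hseg : (cs.drop i).take (j + 1 - i)
        = cs[i] :: (cs.drop (i + 1)).take (j + 1 - (i + 1)) := by
      rw [List.drop_eq_getElem_cons hi]
      have h1 : j + 1 - i = (j + 1 - (i + 1)) + 1 := by omega
      rw [h1, List.take_succ_cons]
    rw [hseg, pvRevSel_cons_nonp p _ (by simpa using hni), pvTake_succ_eq cs i hi]
    simp only [List.append_assoc, List.singleton_append]
  | case2 cs i j hij hpi hnj ih =>
    -- retreat j
    intro hj _
    rw [pvTwoPtr]
    rw [dif_pos hij, if_neg hpi, if_pos hnj]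
    rw [ih (by omega) (by omega)]
    rw [pvGetD_eq cs j hj] at hnj
    have hj1 : j - 1 + 1 = j := by omega
    have hseg : (cs.drop i).take (j + 1 - i)
        = (cs.drop i).take (j - 1 + 1 - i) ++ [cs[j]] := by
      have h1 : j + 1 - i = (j - 1 + 1 - i) + 1 := by omega
      rw [h1, pvTake_succ_eq _ _ (by simp; omega)]
      have h2 : (cs.drop i)[j - 1 + 1 - i]'(by simp; omega) = cs[j] := by
        rw [List.getElem_drop]; congr 1; omega
      rw [h2]
    rw [hseg, pvRevSel_append_nonp p _ (by simpa using hnj)]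
    rw [hj1, List.drop_eq_getElem_cons hj]
    simp
  | case3 cs i j hij hpi hpj ih =>
    -- swap
    intro hj _
    have hi : i < cs.length := by omega
    rw [pvTwoPtr]
    rw [dif_pos hij, if_neg hpi, if_neg hpj]
    rw [ih (by simpa using (by omega : j - 1 < cs.length)) (by omega)]
    rw [pvGetD_eq cs i hi] at hpi
    rw [pvGetD_eq cs j hj] at hpj
    rw [pvGetD_eq cs i hi, pvGetD_eq cs j hj]
    have hpi' : p (cs[i]'hi) = true := by simpa using hpi
    have hpj' : p (cs[j]'hj) = true := by simpa using hpj
    have e1 : j - 1 + 1 - (i + 1) = j - 1 - i := by omega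
    have e2 : j - 1 + 1 = j := by omega
    rw [e1, e2]
    rw [pvSwapTake cs i j (cs[i]'hi) (cs[j]'hj) hij hj]
    rw [pvSwapMid cs i j (cs[i]'hi) (cs[j]'hj) hij hj]
    rw [pvSwapDrop cs i j (cs[i]'hi) (cs[j]'hj) hij hj]
    rw [pvSeg_decomp cs i j hij hj]
    rw [← List.cons_append, pvRevSel_both p (cs[i]'hi) (cs[j]'hj) hpi' hpj']
    simp
  | case4 cs i j hij =>
    intro hj hi1
    rw [pvTwoPtr]
    rw [dif_neg hij]
    have hcase : i = j ∨ i = j + 1 := by omega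
    rcases hcase with rfl | rfl
    · have hseg : (cs.drop i).take (i + 1 - i) = [cs[i]'hj] := by
        rw [show i + 1 - i = 1 from by omega, List.drop_eq_getElem_cons hj,
          List.take_succ_cons, List.take_zero]
      rw [hseg, pvRevSel_single]
      rw [show cs.take i ++ [cs[i]'hj] = cs.take (i + 1) from (pvTake_succ_eq cs i hj).symm,
        List.take_append_drop]

    · rw [Nat.sub_self, List.take_zero, pvRevSel_nil]
      rw [List.append_nil, List.take_append_drop]

theorem pvTwoPtr_full (p : Char → Bool) (l : List Char) (hl : l ≠ []) :
    pvTwoPtr p l 0 (l.length - 1) = pvRevSel p l := by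
  have hlen : 1 ≤ l.length := List.length_pos_iff.mpr hl
  rw [pvTwoPtr_spec p l 0 (l.length - 1) (by omega) (by omega)]
  rw [show l.length - 1 + 1 = l.length from by omega]
  simp

-- ===== VERDICT (by name: the statement is the Claim_ definition above) =====
theorem reverseByType_spec : Claim_equal_reverseByType := by
  intro s _
  unfold Spec_reverseByType reverseByType reverseByType_alt
  simp only [pvPart_eq, List.nil_append]
  rw [pvBuild_eq _ _ _ _ rfl rfl]
  simp only [List.nil_append]
  by_cases hl : s.toList = []
  · rw [hl]
    have h0 : ∀ (p : Char → Bool), pvTwoPtr p [] 0 (0 - 1) = [] := by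
      intro p; rw [pvTwoPtr]; simp
    simp only [List.length_nil]
    rw [h0]
    simp only [List.length_nil]
    rw [h0]
    simp [pvMerge]
  · rw [pvTwoPtr_full PySem.Chars.isalpha s.toList hl]
    have hne : pvRevSel PySem.Chars.isalpha s.toList ≠ [] := by
      intro e
      have := pvRevSel_length PySem.Chars.isalpha s.toList
      rw [e] at this
      exact hl (List.eq_nil_of_length_eq_zero this.symm)
    rw [pvTwoPtr_full (fun c => !PySem.Chars.isalpha c) _ hne]
    unfold pvRevSel
    have hall : ∀ x ∈ (s.toList.filter PySem.Chars.isalpha).reverse, PySem.Chars.isalpha x = true := by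
      intro x hx
      simp only [List.mem_reverse, List.mem_filter] at hx
      exact hx.2
    rw [pvPlace_filter_nonp PySem.Chars.isalpha s.toList _ (by simp) hall]
    rw [pvPlace_place_eq_merge PySem.Chars.isalpha s.toList _ _ hall]
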